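-- pv_equiv track=rewrite | github.com/sheep1008/Algo | 백준/Silver/2108. 통계학/통계학.py | find_most
-- ===== SOURCE A (Python) =====
-- from collections import Counter
--
-- def find_most(l):
--     counter = Counter(l)
--     max_frequency = counter.most_common(1)[0][1]
--     most_common_values = [num for num, freq in counter.items() if freq == max_frequency]
--     most_common_values.sort()
--     if len(most_common_values) == 1:
--         return most_common_values[0]
--     else:
--         return most_common_values[1]
-- ===== SOURCE B (Python) =====
-- def find_most(l):
--     # run-length encode the sorted list: (value, count) pairs in ascending value order
--     groups = []
--     for x in sorted(l):
--         if groups and groups[-1][0] == x: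
--             groups[-1] = (x, groups[-1][1] + 1)
--         else:
--             groups.append((x, 1))
--     best = 0
--     for _, c in groups:
--         if c > best:
--             best = c
--     cands = [v for v, c in groups if c == best]
--     return cands[1] if len(cands) >= 2 else cands[0]
-- ===== Notes on version B (the rewrite author's own statement) =====
-- stated objective: alternative
-- what changed: Replaces Counter + most_common + filter + sort with a single sort followed by a run-length scan whose (value,count) groups come out already in ascending value order, so the tied candidates need no final sort.
import Mathlib
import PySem

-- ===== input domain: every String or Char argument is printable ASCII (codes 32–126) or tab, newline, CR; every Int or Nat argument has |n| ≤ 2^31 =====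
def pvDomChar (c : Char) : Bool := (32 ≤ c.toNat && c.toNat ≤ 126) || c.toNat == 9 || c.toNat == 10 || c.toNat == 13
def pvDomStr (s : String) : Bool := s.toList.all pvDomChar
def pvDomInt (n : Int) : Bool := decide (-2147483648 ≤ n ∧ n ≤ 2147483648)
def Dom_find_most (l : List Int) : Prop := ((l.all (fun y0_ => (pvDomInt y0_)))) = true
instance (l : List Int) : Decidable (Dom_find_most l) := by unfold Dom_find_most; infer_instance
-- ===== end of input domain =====

-- B replaces Counter + most_common with a sort-then-run-length scan whose candidates come out already ordered (alternative decomposition, same cost).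


-- ===== PORT A =====
def find_most (l : List Int) : Int :=
  let counter := PySem.Dict.counter l
  -- counter.most_common(1)[0][1]: most_common = items sorted by count descending (stable);
  -- [0] raises IndexError exactly on empty input, which Pre_find_most excludes (pyGetD default unreachable there)
  let max_frequency := (PySem.List.pyGetD (PySem.List.sorted counter.items (fun p => p.2) true) 0 ((0 : Int), (0 : Int))).2
  let most_common_values := (counter.items.filter (fun p => p.2 == max_frequency)).map (fun p => p.1)
  let mcv := PySem.List.sorted most_common_values (fun x => x) false
  if mcv.length = 1 then PySem.List.pyGetD mcv 0 0 else PySem.List.pyGetD mcv 1 0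

-- ===== PORT B =====
-- one step of B's run-length loop: extend the last run or start a new one
def bStep (gs : List (Int × Int)) (x : Int) : List (Int × Int) :=
  match gs.getLast? with
  | some p => if p.1 = x then gs.dropLast ++ [(x, p.2 + 1)] else gs ++ [(x, 1)]
  | none => gs ++ [(x, 1)]

def find_most_alt (l : List Int) : Int :=
  let groups := (PySem.List.sorted l (fun x => x) false).foldl bStep []
  let best := groups.foldl (fun b p => if p.2 > b then p.2 else b) 0
  let cands := (groups.filter (fun p => p.2 == best)).map (fun p => p.1)
  if cands.length ≥ 2 then PySem.List.pyGetD cands 1 0 else PySem.List.pyGetD cands 0 0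

-- ===== PRECONDITION & SPEC =====
-- Pre_ excludes only the empty list, on which both Pythons raise IndexError.
def Pre_find_most (l : List Int) : Prop := l ≠ []
instance (l : List Int) : Decidable (Pre_find_most l) := by unfold Pre_find_most; infer_instance
def pvWitness_find_most : List Int := [1, 2, 2]

def Spec_find_most (l : List Int) (out : Int) : Prop := out = find_most_alt l
instance (l : List Int) (out : Int) : Decidable (Spec_find_most l out) := by unfold Spec_find_most; infer_instance

-- ===== CLAIM (what is proved, stated in full; the proofs are below) =====
def Claim_equal_find_most : Prop := ∀ (l : List Int), Dom_find_most l → Pre_find_most l → Spec_find_most l (find_most l)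

-- ===== LEMMAS AND PROOFS =====

-- every element of a ≤-sorted list is at most its last element
lemma le_getLast_of_pairwise (L : List Int) (hL : L.Pairwise (· ≤ ·)) (h : L ≠ []) :
    ∀ y ∈ L, y ≤ L.getLast h := by
  induction L with
  | nil => simp at h
  | cons a L ih =>
    intro y hy
    rcases List.mem_cons.mp hy with rfl | hy'
    · cases L with
      | nil => simp
      | cons b L' =>
        have hlast : (b :: L').getLast (by simp) ∈ b :: L' := List.getLast_mem _
        have := (List.pairwise_cons.mp hL).1 _ hlast
        simpa [List.getLast] using this
    · cases L with
      | nil => simp at hy'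
      | cons b L' =>
        have := ih (List.pairwise_cons.mp hL).2 (by simp) y hy'
        simpa [List.getLast] using this

-- set(s) of a ≤-sorted list is strictly increasing
lemma ofList_sorted_lt (s : List Int) (hs : s.Pairwise (· ≤ ·)) :
    (PySem.Set.ofList s).Pairwise (· < ·) := by
  induction s using List.reverseRecOn with
  | nil => simp [PySem.Set.ofList]
  | append_singleton t x ih =>
    have ht : t.Pairwise (· ≤ ·) := hs.sublist (List.sublist_append_left _ _)
    have hub : ∀ y ∈ t, y ≤ x := by
      intro y hy
      exact (List.pairwise_append.mp hs).2.2 y hy x (by simp)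
    rw [PySem.Set.ofList_append_singleton]
    by_cases hx : x ∈ PySem.Set.ofList t
    · rw [PySem.Set.add_of_mem hx]; exact ih ht
    · rw [PySem.Set.add_of_not_mem hx]
      refine List.pairwise_append.mpr ⟨ih ht, by simp, ?_⟩
      intro y hy z hz
      rw [List.mem_singleton] at hz
      subst hz
      have hyt : y ∈ t := (PySem.Set.mem_ofList t y).mp hy
      exact lt_of_le_of_ne (hub y hyt) (fun h => hx (h ▸ hy))

-- B's run-length loop over a ≤-sorted list builds (value, multiplicity) pairs over the distinct values in order
lemma foldl_bStep (s : List Int) (hs : s.Pairwise (· ≤ ·)) :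
    s.foldl bStep [] = (PySem.Set.ofList s).map (fun v => (v, (s.count v : Int))) := by
  induction s using List.reverseRecOn with
  | nil => simp [PySem.Set.ofList]
  | append_singleton t x ih =>
    have ht : t.Pairwise (· ≤ ·) := hs.sublist (List.sublist_append_left _ _)
    have hub : ∀ y ∈ t, y ≤ x := by
      intro y hy
      exact (List.pairwise_append.mp hs).2.2 y hy x (by simp)
    have hV : (PySem.Set.ofList t).Pairwise (· < ·) := ofList_sorted_lt t ht
    have hVle : (PySem.Set.ofList t).Pairwise (· ≤ ·) := hV.imp le_of_lt
    have hnd : (PySem.Set.ofList t).Nodup := PySem.Set.nodup_ofList t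
    rw [List.foldl_append, List.foldl_cons, List.foldl_nil, ih ht,
        PySem.Set.ofList_append_singleton]
    by_cases hx : x ∈ t
    · have hxV : x ∈ PySem.Set.ofList t := (PySem.Set.mem_ofList t x).mpr hx
      have hVne : PySem.Set.ofList t ≠ [] := by
        intro h; rw [h] at hxV; simp at hxV
      have hlastx : (PySem.Set.ofList t).getLast hVne = x := by
        have h1 : (PySem.Set.ofList t).getLast hVne ≤ x := by
          have hm : (PySem.Set.ofList t).getLast hVne ∈ PySem.Set.ofList t := List.getLast_mem _
          exact hub _ ((PySem.Set.mem_ofList t _).mp hm)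
        have h2 : x ≤ (PySem.Set.ofList t).getLast hVne :=
          le_getLast_of_pairwise _ hVle hVne x hxV
        omega
      obtain ⟨D, hD⟩ : ∃ D, PySem.Set.ofList t = D ++ [x] := by
        refine ⟨(PySem.Set.ofList t).dropLast, ?_⟩
        conv_lhs => rw [← List.dropLast_append_getLast hVne, hlastx]
      have hxD : x ∉ D := by
        have := hnd; rw [hD] at this
        exact fun hmem => (List.nodup_append.mp this).2.2 x hmem x (by simp) rfl
      rw [PySem.Set.add_of_mem hxV, hD, List.map_append, List.map_append]
      have hbs : bStep (D.map (fun v => (v, (t.count v : Int))) ++ [(x, (t.count x : Int))]) x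
          = D.map (fun v => (v, (t.count v : Int))) ++ [(x, (t.count x : Int) + 1)] := by
        rw [bStep, List.getLast?_concat]
        simp
      simp only [List.map_cons, List.map_nil] at *
      rw [hbs]
      congr 1
      · apply List.map_congr_left
        intro v hv
        have hvV : v ∈ PySem.Set.ofList t := by rw [hD]; exact List.mem_append_left _ hv
        have hvne : v ≠ x := fun h => hxD (h ▸ hv)
        simp [List.count_append, List.count_eq_zero, hvne]
      · simp [List.count_append]
    · have hxV : x ∉ PySem.Set.ofList t := fun h => hx ((PySem.Set.mem_ofList t x).mp h)
      have hstep : bStep ((PySem.Set.ofList t).map (fun v => (v, (t.count v : Int)))) x =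
          (PySem.Set.ofList t).map (fun v => (v, (t.count v : Int))) ++ [(x, 1)] := by
        rw [bStep]
        cases hL : ((PySem.Set.ofList t).map (fun v => (v, (t.count v : Int)))).getLast? with
        | none => rfl
        | some p =>
          have hpmem : p ∈ (PySem.Set.ofList t).map (fun v => (v, (t.count v : Int))) :=
            List.mem_of_getLast? hL
          obtain ⟨v, hv, rfl⟩ := List.mem_map.mp hpmem
          have : v ≠ x := fun h => hxV (h ▸ hv)
          simp [this]
      rw [hstep, PySem.Set.add_of_not_mem hxV, List.map_append]
      congr 1
      · apply List.map_congr_left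
        intro v hv
        have hvne : v ≠ x := fun h => hxV (h ▸ hv)
        simp [List.count_append, List.count_eq_zero, hvne]
      · simp [List.count_append, List.count_singleton, List.count_eq_zero_of_not_mem hx]

-- B's running-max loop: characterisation
lemma foldl_best (gs : List (Int × Int)) (b : Int) :
    (gs.foldl (fun b p => if p.2 > b then p.2 else b) b = b ∨
       gs.foldl (fun b p => if p.2 > b then p.2 else b) b ∈ gs.map (fun p => p.2)) ∧
    b ≤ gs.foldl (fun b p => if p.2 > b then p.2 else b) b ∧
    ∀ p ∈ gs, p.2 ≤ gs.foldl (fun b p => if p.2 > b then p.2 else b) b := by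
  induction gs generalizing b with
  | nil => simp
  | cons q gs ih =>
    simp only [List.foldl_cons]
    obtain ⟨h1, h2, h3⟩ := ih (if q.2 > b then q.2 else b)
    have hb : b ≤ (if q.2 > b then q.2 else b) := by split_ifs <;> omega
    have hq : q.2 ≤ (if q.2 > b then q.2 else b) := by split_ifs <;> omega
    refine ⟨?_, le_trans hb h2, ?_⟩
    · rcases h1 with h | h
      · rw [h]; split_ifs with hc
        · right; simp
        · left; rfl
      · right; simp only [List.map_cons, List.mem_cons]; exact Or.inr h
    · intro p hp
      rcases List.mem_cons.mp hp with rfl | hp'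
      · exact le_trans hq h2
      · exact h3 p hp'

theorem find_most_spec : Claim_equal_find_most := by
  intro l _ hpre
  unfold Spec_find_most
  obtain ⟨a, ha⟩ : ∃ a, a ∈ l := by
    cases l with
    | nil => exact absurd rfl hpre
    | cons a t => exact ⟨a, by simp⟩
  -- B-side data
  have hsP : (PySem.List.sorted l (fun x => x) false).Pairwise (· ≤ ·) := by
    simpa using PySem.List.sorted_pairwise (xs := l) (key := fun x => x)
  have hperm : (PySem.List.sorted l (fun x => x) false).Perm l :=
    PySem.List.sorted_perm l (fun x => x) false
  have hcnt : ∀ v : Int, (PySem.List.sorted l (fun x => x) false).count v = l.count v :=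
    fun v => hperm.count_eq v
  have hgroups : (PySem.List.sorted l (fun x => x) false).foldl bStep [] =
      (PySem.Set.ofList (PySem.List.sorted l (fun x => x) false)).map
        (fun v => (v, (l.count v : Int))) := by
    rw [foldl_bStep _ hsP]
    exact List.map_congr_left (fun v _ => by rw [hcnt])
  have hVlt : (PySem.Set.ofList (PySem.List.sorted l (fun x => x) false)).Pairwise (· < ·) :=
    ofList_sorted_lt _ hsP
  have hVnd : (PySem.Set.ofList (PySem.List.sorted l (fun x => x) false)).Nodup :=
    PySem.Set.nodup_ofList _
  have hmemV : ∀ v : Int, v ∈ PySem.Set.ofList (PySem.List.sorted l (fun x => x) false) ↔ v ∈ l :=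
    fun v => by rw [PySem.Set.mem_ofList]; exact hperm.mem_iff
  -- A-side data
  have hitems : (PySem.Dict.counter l).items =
      (PySem.Set.ofList l).map (fun k => (k, (l.count k : Int))) := PySem.Dict.items_counter l
  have hKnd : (PySem.Set.ofList l).Nodup := PySem.Set.nodup_ofList l
  have hitems_ne : (PySem.Dict.counter l).items ≠ [] := by
    rw [hitems]
    intro h
    have : a ∈ PySem.Set.ofList l := (PySem.Set.mem_ofList l a).mpr ha
    rw [List.map_eq_nil_iff.mp h] at this
    simp at this
  have hsdne : PySem.List.sorted (PySem.Dict.counter l).items (fun p => p.2) true ≠ [] := by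
    rw [Ne, PySem.List.sorted_eq_nil_iff]
    exact hitems_ne
  obtain ⟨m, rest, hsd⟩ := List.exists_cons_of_ne_nil hsdne
  have hm_mem : m ∈ (PySem.Dict.counter l).items := by
    have : m ∈ PySem.List.sorted (PySem.Dict.counter l).items (fun p => p.2) true := by
      rw [hsd]; simp
    rwa [PySem.List.mem_sorted] at this
  obtain ⟨k, hkK, hmk⟩ := List.mem_map.mp (by rwa [hitems] at hm_mem)
  have hkl : k ∈ l := (PySem.Set.mem_ofList l k).mp hkK
  have hub : ∀ y ∈ (PySem.Dict.counter l).items, y.2 ≤ m.2 :=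
    PySem.List.key_head_sorted_rev_ge _ _ hsd
  have hM : m.2 = (l.count k : Int) := by rw [← hmk]
  have hMub : ∀ v ∈ l, (l.count v : Int) ≤ m.2 := by
    intro v hv
    have : (v, (l.count v : Int)) ∈ (PySem.Dict.counter l).items := by
      rw [hitems]
      exact List.mem_map.mpr ⟨v, (PySem.Set.mem_ofList l v).mpr hv, rfl⟩
    exact hub _ this
  -- best = m.2
  obtain ⟨hb1, -, hb3⟩ := foldl_best
    ((PySem.Set.ofList (PySem.List.sorted l (fun x => x) false)).map
      (fun v => (v, (l.count v : Int)))) 0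
  have hbub : ∀ v ∈ l, (l.count v : Int) ≤
      ((PySem.Set.ofList (PySem.List.sorted l (fun x => x) false)).map
        (fun v => (v, (l.count v : Int)))).foldl (fun b p => if p.2 > b then p.2 else b) 0 := by
    intro v hv
    exact hb3 _ (List.mem_map.mpr ⟨v, (hmemV v).mpr hv, rfl⟩)
  have hbestM :
      ((PySem.Set.ofList (PySem.List.sorted l (fun x => x) false)).map
        (fun v => (v, (l.count v : Int)))).foldl (fun b p => if p.2 > b then p.2 else b) 0 = m.2 := by
    refine le_antisymm ?_ (hM ▸ hbub k hkl)
    rcases hb1 with h | h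
    · exfalso
      have h1 : 1 ≤ l.count a := List.count_pos_iff.mpr ha
      have h2 := hbub a ha
      rw [h] at h2
      omega
    · rw [List.map_map] at h
      obtain ⟨v, hv, hveq⟩ := List.mem_map.mp h
      rw [← hveq]
      exact hMub v ((hmemV v).mp hv)
  -- the candidate list, common to both sides
  have hCeq :
      PySem.List.sorted
        (((PySem.Dict.counter l).items.filter (fun p => p.2 == m.2)).map (fun p => p.1))
        (fun x => x) false =
      ((PySem.Set.ofList (PySem.List.sorted l (fun x => x) false)).filter
        (fun v => (l.count v : Int) == m.2)) := by
    have hCpw : (((PySem.Set.ofList (PySem.List.sorted l (fun x => x) false)).filter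
        (fun v => (l.count v : Int) == m.2))).Pairwise (· < ·) :=
      hVlt.sublist List.filter_sublist
    have hCnd : (((PySem.Set.ofList (PySem.List.sorted l (fun x => x) false)).filter
        (fun v => (l.count v : Int) == m.2))).Nodup :=
      hVnd.sublist List.filter_sublist
    have hAnd : ((((PySem.Dict.counter l).items.filter (fun p => p.2 == m.2)).map
        (fun p => p.1))).Nodup := by
      rw [hitems, List.filter_map, List.map_map]
      have : ((fun p : Int × Int => p.1) ∘ fun k => (k, (l.count k : Int))) = fun k => k := rfl
      rw [this, List.map_id']
      exact hKnd.sublist List.filter_sublist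
    refine PySem.List.sorted_eq_of_perm_of_pairwise_lt _ _ _ ?_ hCpw
    refine (List.perm_ext_iff_of_nodup hCnd hAnd).mpr ?_
    intro v
    rw [hitems, List.filter_map, List.map_map]
    have h1 : ((fun p : Int × Int => p.1) ∘ fun k => (k, (l.count k : Int))) = fun k => k := rfl
    rw [h1, List.map_id']
    simp only [List.mem_filter, Function.comp, hmemV, PySem.Set.mem_ofList]
  have hCne : ((PySem.Set.ofList (PySem.List.sorted l (fun x => x) false)).filter
      (fun v => (l.count v : Int) == m.2)) ≠ [] := by
    intro h
    have hkV : k ∈ PySem.Set.ofList (PySem.List.sorted l (fun x => x) false) := (hmemV k).mpr hkl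
    have : k ∈ ((PySem.Set.ofList (PySem.List.sorted l (fun x => x) false)).filter
        (fun v => (l.count v : Int) == m.2)) :=
      List.mem_filter.mpr ⟨hkV, by rw [hM]; simp⟩
    rw [h] at this
    simp at this
  -- reduce both sides
  show find_most l = find_most_alt l
  simp only [find_most, find_most_alt]
  rw [hsd, PySem.List.pyGetD_zero_cons]
  rw [hgroups, hbestM, hCeq, List.filter_map]
  have h1 : ((fun p : Int × Int => p.1) ∘ fun v => (v, (l.count v : Int))) = fun v => v := rfl
  rw [List.map_map, h1, List.map_id']
  have hfc : (fun p : Int × Int => p.2 == m.2) ∘ (fun v => (v, (l.count v : Int))) =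
      fun v => (l.count v : Int) == m.2 := rfl
  rw [hfc]
  -- both sides now index into the same candidate list
  cases hC : ((PySem.Set.ofList (PySem.List.sorted l (fun x => x) false)).filter
      (fun v => (l.count v : Int) == m.2)) with
  | nil => exact absurd hC hCne
  | cons c cs =>
    cases cs with
    | nil => simp
    | cons c2 cs2 => simp
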